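-- pv_equiv track=rewrite | github.com/yannickloth/W33-Theory | exploration/QUICK_STRUCTURE_TEST.py | can_appear_in_derived
-- ===== SOURCE A (Python) =====
-- def omega(g1, g2):
--     return (g1[0] * g2[1] - g1[1] * g2[0]) % 3
--
-- def can_appear_in_derived(t_grade):
--     """Check if grade t_grade can appear in [g,g]"""
--     for i in range(3):
--         for j in range(3):
--             g1 = (i, j)
--             g2 = ((t_grade[0] - i) % 3, (t_grade[1] - j) % 3)
--             if g1 != (0, 0) and g2 != (0, 0):  # Both must be non-central
--                 if omega(g1, g2) != 0:
--                     return True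
--     return False
-- ===== SOURCE B (Python) =====
-- def can_appear_in_derived(t_grade):
--     """Check if grade t_grade can appear in [g,g]"""
--     # Closed form: such a decomposition exists iff t_grade is not the zero grade mod 3.
--     return t_grade[0] % 3 != 0 or t_grade[1] % 3 != 0
-- ===== Notes on version B (the rewrite author's own statement) =====
-- stated objective: simpler
-- what changed: Replaced the 3x3 double loop with helper omega by the closed-form observation that a valid decomposition exists exactly when t_grade is nonzero mod 3, so B is a single modular test.
import Mathlib
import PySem

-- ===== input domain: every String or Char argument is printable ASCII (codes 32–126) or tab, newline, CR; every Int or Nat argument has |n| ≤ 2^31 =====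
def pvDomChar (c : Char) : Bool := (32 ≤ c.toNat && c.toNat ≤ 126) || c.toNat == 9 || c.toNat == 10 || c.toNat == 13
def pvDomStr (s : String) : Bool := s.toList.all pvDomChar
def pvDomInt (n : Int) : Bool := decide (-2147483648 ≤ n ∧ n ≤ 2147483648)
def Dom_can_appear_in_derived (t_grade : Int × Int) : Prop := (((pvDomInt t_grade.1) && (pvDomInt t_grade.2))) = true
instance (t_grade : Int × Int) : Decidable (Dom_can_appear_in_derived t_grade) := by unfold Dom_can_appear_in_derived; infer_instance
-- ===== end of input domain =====

-- B replaces A's 3x3 search loop by the equivalent closed-form modular test (simpler).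


-- ===== PORT A =====
def pyOmega (g1 g2 : Int × Int) : Int :=
  PySem.Int.mod (g1.1 * g2.2 - g1.2 * g2.1) 3

def can_appear_in_derived (t_grade : Int × Int) : Bool :=
  (PySem.List.pyRange 0 3 1).any (fun i =>
    (PySem.List.pyRange 0 3 1).any (fun j =>
      let g1 : Int × Int := (i, j)
      let g2 : Int × Int := (PySem.Int.mod (t_grade.1 - i) 3, PySem.Int.mod (t_grade.2 - j) 3)
      (decide (g1 ≠ ((0 : Int), (0 : Int))) && decide (g2 ≠ ((0 : Int), (0 : Int)))) &&
        (pyOmega g1 g2 != 0)))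

-- ===== PORT B =====
def can_appear_in_derived_alt (t_grade : Int × Int) : Bool :=
  (PySem.Int.mod t_grade.1 3 != 0) || (PySem.Int.mod t_grade.2 3 != 0)

-- ===== PRECONDITION & SPEC =====
def Spec_can_appear_in_derived (t_grade : Int × Int) (out : Bool) : Prop := out = can_appear_in_derived_alt t_grade
instance (t_grade : Int × Int) (out : Bool) : Decidable (Spec_can_appear_in_derived t_grade out) := by unfold Spec_can_appear_in_derived; infer_instance

-- ===== CLAIM (what is proved, stated in full; the proofs are below) =====
def Claim_equal_can_appear_in_derived : Prop := ∀ (t_grade : Int × Int), Dom_can_appear_in_derived t_grade → Spec_can_appear_in_derived t_grade (can_appear_in_derived t_grade)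

-- ===== LEMMAS AND PROOFS =====

-- ===== VERDICT (by name: the statement is the Claim_ definition above) =====
theorem can_appear_in_derived_spec : Claim_equal_can_appear_in_derived := by
  intro t _
  obtain ⟨a, b⟩ := t
  unfold Spec_can_appear_in_derived
  have hr : PySem.List.pyRange 0 3 1 = [0, 1, 2] := by decide
  rw [Bool.eq_iff_iff]
  simp only [can_appear_in_derived, can_appear_in_derived_alt, pyOmega, hr,
    PySem.Int.mod_eq_emod_of_pos (by norm_num : (0:Int) < 3),
    List.any_cons, List.any_nil, Bool.or_eq_true, Bool.and_eq_true,
    bne_iff_ne, ne_eq, decide_eq_true_iff, Prod.mk.injEq, not_and]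
  norm_num
  omega
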